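-- pv_equiv track=rewrite | github.com/0lhakitura/awesome_python_project | Functions/homework_2.py | get_characters_in_two_string
-- ===== SOURCE A (Python) =====
-- from collections import Counter
--
-- def get_characters_in_two_string(list_strings):
--     new_list = []
--     for word in list_strings:
--         for character in word:
--             new_list.append(character)
--     counter = Counter(new_list)
--     characters_in_two_strings = []
--     for y, x in counter.items():
--         if x >= 2:
--             characters_in_two_strings.append(y)
--     return characters_in_two_strings
-- ===== SOURCE B (Python) =====
-- def get_characters_in_two_string(list_strings):
--     def rec(flat):
--         if not flat:
--             return []
--         c = flat[0]
--         rest = flat[1:]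
--         tail = rec([x for x in rest if x != c])
--         return [c] + tail if c in rest else tail
--     return rec([ch for w in list_strings for ch in w])
-- ===== Notes on version B (the rewrite author's own statement) =====
-- stated objective: alternative
-- what changed: Replaces A's three staged passes (flatten loop, Counter table build, items-filter loop) with a recursion on the flattened character list: the head character is emitted iff it reoccurs in the tail, then the recursion continues on the tail with all copies of that character filtered out, so no count table or membership-in-result test exists.
import Mathlib
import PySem

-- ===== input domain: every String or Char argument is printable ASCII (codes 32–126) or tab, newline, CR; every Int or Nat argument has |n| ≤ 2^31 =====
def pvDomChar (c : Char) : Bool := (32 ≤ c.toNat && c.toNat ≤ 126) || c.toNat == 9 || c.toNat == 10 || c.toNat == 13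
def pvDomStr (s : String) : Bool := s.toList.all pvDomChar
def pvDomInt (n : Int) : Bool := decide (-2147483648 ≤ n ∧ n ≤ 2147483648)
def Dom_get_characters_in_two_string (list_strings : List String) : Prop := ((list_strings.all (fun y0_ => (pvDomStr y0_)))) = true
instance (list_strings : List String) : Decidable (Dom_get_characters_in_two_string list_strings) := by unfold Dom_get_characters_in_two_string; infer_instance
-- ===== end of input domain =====

-- B replaces A's Counter table with a recursion on the flattened character list (emit the head iff it reoccurs, recurse with that character filtered out); same return value, first-appearance order.
-- ===== PORT A =====
def get_characters_in_two_string (list_strings : List String) : List String :=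
  let new_list := list_strings.foldl
    (fun acc word => word.toList.foldl (fun acc c => acc ++ [c.toString]) acc) []
  let counter := PySem.Dict.counter new_list
  counter.items.foldl (fun acc yx => if yx.2 ≥ 2 then acc ++ [yx.1] else acc) []

-- ===== PORT B =====
-- rec(flat) from Source B: emit head iff it recurs in the tail, recurse on the tail without it
-- (fuel = length of the list is only a structural-recursion guard; the zero-fuel branch is unreachable)
def pvAltRecFuel : Nat → List String → List String
  | _, [] => []
  | 0, _ :: _ => []
  | Nat.succ n, c :: rest =>
      if c ∈ rest then c :: pvAltRecFuel n (rest.filter (fun x => x ≠ c))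
      else pvAltRecFuel n (rest.filter (fun x => x ≠ c))

def pvAltRec (l : List String) : List String := pvAltRecFuel l.length l

def get_characters_in_two_string_alt (list_strings : List String) : List String :=
  pvAltRec (list_strings.flatMap (fun w => w.toList.map (fun c => c.toString)))

-- ===== PRECONDITION & SPEC =====
def Spec_get_characters_in_two_string (list_strings : List String) (out : List String) : Prop := out = get_characters_in_two_string_alt list_strings
instance (list_strings : List String) (out : List String) : Decidable (Spec_get_characters_in_two_string list_strings out) := by unfold Spec_get_characters_in_two_string; infer_instance

-- ===== CLAIM (what is proved, stated in full; the proofs are below) =====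
def Claim_equal_get_characters_in_two_string : Prop := ∀ (list_strings : List String), Dom_get_characters_in_two_string list_strings → Spec_get_characters_in_two_string list_strings (get_characters_in_two_string list_strings)

-- ===== LEMMAS AND PROOFS =====

-- A's flattening loops produce the flat character list.
lemma flatten_eq : ∀ (ls acc : List String),
    ls.foldl (fun acc word => word.toList.foldl (fun a c => a ++ [c.toString]) acc) acc
      = acc ++ ls.flatMap (fun w => w.toList.map (fun c => c.toString)) := by
  intro ls
  induction ls with
  | nil => intro acc; simp
  | cons w ls ih =>
    intro acc
    simp only [List.foldl_cons, PySem.List.foldl_append_singleton_eq_map,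
      PySem.List.foldl_append_eq_flatMap]
    simp only [List.flatMap_cons]
    simp [List.append_assoc, show Char.toString = fun c => String.singleton c from rfl]

-- A: flatten, Counter, keep items with count ≥ 2 — equals first-occurrence dedup then filter.
lemma portA_eq (list_strings : List String) :
    get_characters_in_two_string list_strings
      = (PySem.Set.ofList (list_strings.flatMap (fun w => w.toList.map (fun c => c.toString)))).filter
          (fun c => decide (2 ≤ List.count c (list_strings.flatMap (fun w => w.toList.map (fun c => c.toString))))) := by
  unfold get_characters_in_two_string
  rw [show list_strings.foldl (fun acc word => word.toList.foldl (fun a c => a ++ [c.toString]) acc) [] =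
      list_strings.flatMap (fun w => w.toList.map (fun c => c.toString)) from by
    simpa using flatten_eq list_strings []]
  set fl := list_strings.flatMap (fun w => w.toList.map (fun c => c.toString)) with hfl
  simp only [PySem.Dict.items_counter, List.foldl_map]
  rw [show (List.foldl (fun acc k => if ((List.count k fl : Nat) : Int) ≥ 2 then acc ++ [k] else acc)
        [] (PySem.Set.ofList fl)) =
      [] ++ (PySem.Set.ofList fl).filter (fun k => decide (((List.count k fl : Nat) : Int) ≥ 2)) from
    PySem.List.foldl_append_ite_eq_filter _ _ _]
  simp only [List.nil_append]
  apply List.filter_congr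
  intro x _
  simp only [ge_iff_le, decide_eq_decide]
  exact_mod_cast Iff.rfl

-- first-occurrence dedup commutes with removing one element.
lemma discard_ofList (c : String) : ∀ (l : List String),
    PySem.Set.discard (PySem.Set.ofList l) c = PySem.Set.ofList (l.filter (fun x => x ≠ c)) := by
  intro l
  induction l with
  | nil => rfl
  | cons x xs ih =>
    by_cases hxc : x = c
    · subst hxc
      rw [PySem.Set.ofList_cons]
      simp only [PySem.Set.discard, List.filter_cons, List.filter_filter] at *
      simpa using ih
    · rw [PySem.Set.ofList_cons, List.filter_cons]
      simp only [PySem.Set.discard, List.filter_cons, List.filter_filter] at *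
      simp only [hxc, ne_eq, not_false_iff, decide_true, if_true]
      rw [show (fun y => !y == c && !y == x) = (fun y => !y == x && !y == c) from by
        funext y; exact Bool.and_comm _ _]
      rw [← List.filter_filter, ih, PySem.Set.ofList_cons]
      simp [PySem.Set.discard, hxc]

-- B's recursion equals first-occurrence dedup then filter by count ≥ 2.
lemma altRec_eq : ∀ (n : Nat) (l : List String), l.length ≤ n →
    pvAltRecFuel n l = (PySem.Set.ofList l).filter (fun c => decide (2 ≤ List.count c l)) := by
  intro n
  induction n with
  | zero =>
    intro l hl
    have : l = [] := List.eq_nil_of_length_eq_zero (Nat.le_zero.mp hl)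
    subst this
    simp [pvAltRecFuel]
  | succ n ih =>
    intro l hl
    cases l with
    | nil => simp [pvAltRecFuel]
    | cons c rest =>
      have hlen : (rest.filter (fun x => x ≠ c)).length ≤ n :=
        le_trans (List.length_filter_le _ _) (Nat.succ_le_succ_iff.mp hl)
      rw [pvAltRecFuel, PySem.Set.ofList_cons, discard_ofList, List.filter_cons]
      have hhead : decide (2 ≤ List.count c (c :: rest)) = decide (c ∈ rest) := by
        simp only [List.count_cons_self, decide_eq_decide]
        constructor
        · intro h; exact List.count_pos_iff.mp (by omega)
        · intro h; have := List.count_pos_iff.mpr h; omega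
      have htail : (PySem.Set.ofList (rest.filter (fun x => x ≠ c))).filter
            (fun x => decide (2 ≤ List.count x (c :: rest)))
          = pvAltRecFuel n (rest.filter (fun x => x ≠ c)) := by
        rw [ih _ hlen]
        apply List.filter_congr
        intro x hx
        have hxmem : x ∈ rest.filter (fun x => x ≠ c) := by simpa [PySem.Set.mem_ofList] using hx
        have hxc : x ≠ c := by
          have := List.of_mem_filter hxmem
          simpa using this
        have hcx : ¬ c = x := fun h => hxc h.symm
        have h1 : List.count x (c :: rest) = List.count x rest := by
          simp [hcx]
        have h2 : List.count x (rest.filter (fun x => x ≠ c)) = List.count x rest :=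
          List.count_filter (by simp [hxc])
        simp only [h1, h2]
      rw [hhead, htail]
      by_cases hmem : c ∈ rest <;> simp [hmem]

-- B equals the same dedup-then-filter form on the flat list.
lemma portB_eq (list_strings : List String) :
    get_characters_in_two_string_alt list_strings
      = (PySem.Set.ofList (list_strings.flatMap (fun w => w.toList.map (fun c => c.toString)))).filter
          (fun c => decide (2 ≤ List.count c (list_strings.flatMap (fun w => w.toList.map (fun c => c.toString))))) := by
  unfold get_characters_in_two_string_alt pvAltRec
  exact altRec_eq _ _ le_rfl

-- ===== VERDICT (by name: the statement is the Claim_ definition above) =====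
theorem get_characters_in_two_string_spec : Claim_equal_get_characters_in_two_string := by
  intro list_strings _
  unfold Spec_get_characters_in_two_string
  rw [portA_eq, portB_eq]
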